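-- pv_equiv track=rewrite | github.com/MinoMino/mindl-legacy | mindl/plugins/binb/descramble.py | _calculate_descramble_index
-- ===== SOURCE A (Python) =====
-- def _calculate_descramble_index(filename):
--     """
--     Descramble data comes in arrays of 8 items, where which of the items
--     should be used depends on the filename of the scrambled image.
--     """
--     c = 0
--     p = 0
--     for i, char in enumerate(filename):
--         char = ord(char)
--         if i % 2 == 0:
--             p += char
--         else:
--             c += char
--     p %= 8
--     c %= 8
--
--     return c, p
-- ===== SOURCE B (Python) =====
-- def _calculate_descramble_index(filename):
--     # Fold the string right-to-left with role-swapping accumulators: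
--     # prepending a char shifts every parity, so even(ch + rest) = ord(ch) + odd(rest)
--     # and odd(ch + rest) = even(rest). No index, no parity test, no stride.
--     e = 0
--     o = 0
--     for ch in reversed(filename):
--         e, o = ord(ch) + o, e
--     return o % 8, e % 8
-- ===== Notes on version B (the rewrite author's own statement) =====
-- stated objective: alternative
-- what changed: Replaces the indexed loop with an i%2 parity branch by a right-to-left fold with two role-swapping accumulators, using the identity even(ch+rest)=ord(ch)+odd(rest), odd(ch+rest)=even(rest): no index and no parity test exist in B.
import Mathlib
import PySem

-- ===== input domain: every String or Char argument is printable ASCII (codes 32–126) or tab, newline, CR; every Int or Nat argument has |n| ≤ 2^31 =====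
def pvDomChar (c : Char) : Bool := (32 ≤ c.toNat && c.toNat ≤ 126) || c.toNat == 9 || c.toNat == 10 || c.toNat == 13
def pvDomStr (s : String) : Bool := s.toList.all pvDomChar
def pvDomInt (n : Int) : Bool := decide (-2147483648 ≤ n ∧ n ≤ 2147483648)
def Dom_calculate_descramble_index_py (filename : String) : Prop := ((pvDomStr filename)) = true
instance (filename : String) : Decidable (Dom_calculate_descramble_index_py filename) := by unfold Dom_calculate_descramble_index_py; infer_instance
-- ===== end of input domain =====

-- B replaces the indexed parity-branching loop by a right-to-left fold with role-swapping accumulators (same cost, different decomposition).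
-- ===== PORT A =====
def calculate_descramble_index_py (filename : String) : Int × Int :=
  let st := (PySem.List.enumerate filename.toList 0).foldl
    (fun (cp : Int × Int) (ic : Int × Char) =>
      let ch : Int := ic.2.toNat
      if PySem.Int.mod ic.1 2 = 0 then (cp.1, cp.2 + ch) else (cp.1 + ch, cp.2))
    (0, 0)
  (PySem.Int.mod st.1 8, PySem.Int.mod st.2 8)

-- ===== PORT B =====
-- B's loop over reversed(filename), swapping the (e, o) accumulators each step
def calculate_descramble_index_py_alt (filename : String) : Int × Int :=
  let eo := filename.toList.reverse.foldl
    (fun (eo : Int × Int) (ch : Char) => ((ch.toNat : Int) + eo.2, eo.1)) (0, 0)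
  (PySem.Int.mod eo.2 8, PySem.Int.mod eo.1 8)

-- ===== PRECONDITION & SPEC =====
def Spec_calculate_descramble_index_py (filename : String) (out : Int × Int) : Prop := out = calculate_descramble_index_py_alt filename
instance (filename : String) (out : Int × Int) : Decidable (Spec_calculate_descramble_index_py filename out) := by unfold Spec_calculate_descramble_index_py; infer_instance

-- ===== CLAIM (what is proved, stated in full; the proofs are below) =====
def Claim_equal_calculate_descramble_index_py : Prop := ∀ (filename : String), Dom_calculate_descramble_index_py filename → Spec_calculate_descramble_index_py filename (calculate_descramble_index_py filename)

-- ===== LEMMAS AND PROOFS =====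
-- proof-only helper: (sum of char codes at even positions, sum at odd positions)
def pvPairSums : List Char → Int × Int
  | [] => (0, 0)
  | [a] => ((a.toNat : Int), 0)
  | a :: b :: rest =>
    let pc := pvPairSums rest
    ((a.toNat : Int) + pc.1, (b.toNat : Int) + pc.2)

-- A's fold over enumerate starting at an even index computes (odd-sum, even-sum)
theorem pvFold_enumerate_eq (l : List Char) : ∀ (k : Nat) (c p : Int),
    (PySem.List.enumerate l (2 * (k : Int))).foldl
      (fun (cp : Int × Int) (ic : Int × Char) =>
        let ch : Int := ic.2.toNat
        if PySem.Int.mod ic.1 2 = 0 then (cp.1, cp.2 + ch) else (cp.1 + ch, cp.2))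
      (c, p)
    = (c + (pvPairSums l).2, p + (pvPairSums l).1) := by
  induction l using pvPairSums.induct with
  | case1 => intro k c p; simp [PySem.List.enumerate_nil, pvPairSums]
  | case2 a =>
    intro k c p
    have h0 : PySem.Int.mod (2 * (k : Int)) 2 = 0 := by
      rw [PySem.Int.mod_eq_emod_of_pos (by norm_num)]; omega
    simp [PySem.List.enumerate_cons, PySem.List.enumerate_nil, pvPairSums]
  | case3 a b rest ih =>
    intro k c p
    have h0 : PySem.Int.mod (2 * (k : Int)) 2 = 0 := by
      rw [PySem.Int.mod_eq_emod_of_pos (by norm_num)]; omega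
    have h1 : PySem.Int.mod (2 * (k : Int) + 1) 2 ≠ 0 := by
      rw [PySem.Int.mod_eq_emod_of_pos (by norm_num)]; omega
    have hk : (2 * (k : Int) + 1) + 1 = 2 * ((k + 1 : Nat) : Int) := by push_cast; ring
    simp only [PySem.List.enumerate_cons, List.foldl_cons, h0, h1, if_true, if_false, hk]
    rw [ih (k + 1)]
    simp [pvPairSums]; constructor <;> ring

-- B's fold over the reversed list is a foldr of the swap step, which computes pvPairSums
theorem pvRevFold_eq (l : List Char) :
    l.reverse.foldl (fun (eo : Int × Int) (ch : Char) => ((ch.toNat : Int) + eo.2, eo.1)) (0, 0)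
    = pvPairSums l := by
  rw [List.foldl_reverse]
  induction l using pvPairSums.induct with
  | case1 => simp [pvPairSums]
  | case2 a => simp [pvPairSums]
  | case3 a b rest ih => simp only [List.foldr_cons, ih, pvPairSums]

-- ===== VERDICT (by name: the statement is the Claim_ definition above) =====
theorem calculate_descramble_index_py_spec : Claim_equal_calculate_descramble_index_py := by
  intro filename _
  show _ = _
  unfold calculate_descramble_index_py calculate_descramble_index_py_alt
  have h := pvFold_enumerate_eq filename.toList 0 0 0
  simp only [Nat.cast_zero, mul_zero, zero_add] at h
  rw [h, pvRevFold_eq]
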